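-- pv_equiv track=rewrite | github.com/okms/dottie-cli | src/dottie_cli/cli.py | normalize_global_flags
-- ===== SOURCE A (Python) =====
-- def normalize_global_flags(argv: list[str] | None) -> list[str] | None:
--     if argv is None:
--         return None
--
--     remaining = list(argv)
--     prefix: list[str] = []
--
--     idx = 0
--     while idx < len(remaining):
--         token = remaining[idx]
--         if token == "--json":
--             prefix.append(token)
--             del remaining[idx]
--             continue
--         if token == "--token-file":
--             if idx + 1 >= len(remaining):
--                 return list(argv)
--             prefix.extend([token, remaining[idx + 1]])
--             del remaining[idx : idx + 2]
--             continue
--         idx += 1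
--
--     return [*prefix, *remaining]
-- ===== SOURCE B (Python) =====
-- def normalize_global_flags(argv):
--     if argv is None:
--         return None
--     # pass 1: validation — walk argv with A's consumption rule; a "--token-file"
--     # with no following token makes the whole call a no-op copy.
--     i = 0
--     while i < len(argv):
--         if argv[i] == "--token-file":
--             if i + 1 >= len(argv):
--                 return list(argv)
--             i += 2
--         else:
--             i += 1
--     # pass 2: build prefix (global flags) and rest in one scan, no deletions.
--     prefix = []
--     rest = []
--     i = 0
--     while i < len(argv):
--         t = argv[i]
--         if t == "--json":
--             prefix.append(t)
--             i += 1
--         elif t == "--token-file":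
--             prefix.append(t)
--             prefix.append(argv[i + 1])
--             i += 2
--         else:
--             rest.append(t)
--             i += 1
--     return prefix + rest
-- ===== Notes on version B (the rewrite author's own statement) =====
-- stated objective: simpler
-- what changed: Replaces A's single interleaved scan that mutates the list with del-and-retry (re-indexing after every deletion) by two read-only passes over the original argv: a validation pass for the missing-value case, then a build pass that appends into prefix/rest lists; no mutation of the scanned list.
import Mathlib
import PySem

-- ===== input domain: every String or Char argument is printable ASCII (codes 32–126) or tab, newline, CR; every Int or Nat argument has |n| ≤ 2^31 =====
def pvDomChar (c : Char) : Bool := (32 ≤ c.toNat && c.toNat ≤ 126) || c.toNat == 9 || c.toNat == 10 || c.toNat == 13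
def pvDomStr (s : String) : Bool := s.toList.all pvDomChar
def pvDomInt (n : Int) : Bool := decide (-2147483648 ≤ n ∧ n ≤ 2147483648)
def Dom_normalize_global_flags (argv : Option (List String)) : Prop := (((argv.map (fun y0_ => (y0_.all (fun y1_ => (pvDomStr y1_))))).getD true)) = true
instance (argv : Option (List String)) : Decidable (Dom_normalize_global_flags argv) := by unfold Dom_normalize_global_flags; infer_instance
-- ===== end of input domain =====

-- B replaces A's interleaved scan-with-deletions by two read-only passes (validate, then build); same return value on every input.


-- ===== PORT A =====
-- A's while loop: state (remaining, prefixAcc, idx), deletions done with take/drop; argv0 is the saved original for the early return.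
def nfLoopA (argv0 : List String) (remaining prefixAcc : List String) (idx : Nat) : List String :=
  if h : idx < remaining.length then
    let token := remaining[idx]!
    if token = "--json" then
      nfLoopA argv0 (remaining.take idx ++ remaining.drop (idx + 1)) (prefixAcc ++ [token]) idx
    else if token = "--token-file" then
      if remaining.length ≤ idx + 1 then
        argv0
      else
        nfLoopA argv0 (remaining.take idx ++ remaining.drop (idx + 2))
          (prefixAcc ++ [token, remaining[idx + 1]!]) idx
    else
      nfLoopA argv0 remaining prefixAcc (idx + 1)
  else
    prefixAcc ++ remaining
termination_by remaining.length - idx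
decreasing_by
  · simp only [List.length_append, List.length_take, List.length_drop]; omega
  · simp only [List.length_append, List.length_take, List.length_drop]; omega
  · omega

def normalize_global_flags (argv : Option (List String)) : Option (List String) :=
  match argv with
  | none => none
  | some xs => some (nfLoopA xs xs [] 0)

-- ===== PORT B =====
-- B pass 1: validation with A's consumption rule (advance 2 past "--token-file"+value, 1 otherwise).
def nfValidB (xs : List String) (i : Nat) : Bool :=
  if h : i < xs.length then
    if xs[i]! = "--token-file" then
      if xs.length ≤ i + 1 then false else nfValidB xs (i + 2)
    else nfValidB xs (i + 1)
  else true
termination_by xs.length - i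

-- B pass 2: build prefix/rest by appending, scanning the untouched argv.
def nfBuildB (xs : List String) (i : Nat) (pre rest : List String) : List String :=
  if h : i < xs.length then
    let t := xs[i]!
    if t = "--json" then nfBuildB xs (i + 1) (pre ++ [t]) rest
    else if t = "--token-file" then nfBuildB xs (i + 2) (pre ++ [t, xs[i + 1]!]) rest
    else nfBuildB xs (i + 1) pre (rest ++ [t])
  else pre ++ rest
termination_by xs.length - i

def normalize_global_flags_alt (argv : Option (List String)) : Option (List String) :=
  match argv with
  | none => none
  | some xs =>
    if nfValidB xs 0 then some (nfBuildB xs 0 [] []) else some xs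

-- ===== PRECONDITION & SPEC =====
def Spec_normalize_global_flags (argv : Option (List String)) (out : Option (List String)) : Prop := out = normalize_global_flags_alt argv
instance (argv : Option (List String)) (out : Option (List String)) : Decidable (Spec_normalize_global_flags argv out) := by unfold Spec_normalize_global_flags; infer_instance

-- ===== CLAIM (what is proved, stated in full; the proofs are below) =====
def Claim_equal_normalize_global_flags : Prop := ∀ (argv : Option (List String)), Dom_normalize_global_flags argv → Spec_normalize_global_flags argv (normalize_global_flags argv)

-- ===== LEMMAS AND PROOFS =====

-- pure reference functions for B's build pass
def nfPre : List String → List String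
  | [] => []
  | t :: tl =>
    if t = "--json" then t :: nfPre tl
    else if t = "--token-file" then
      match tl with
      | [] => []
      | v :: tl2 => t :: v :: nfPre tl2
    else nfPre tl

def nfRest : List String → List String
  | [] => []
  | t :: tl =>
    if t = "--json" then nfRest tl
    else if t = "--token-file" then
      match tl with
      | [] => []
      | v :: tl2 => nfRest tl2
    else t :: nfRest tl

def nfValid : List String → Bool
  | [] => true
  | t :: tl =>
    if t = "--token-file" then
      match tl with
      | [] => false
      | _ :: tl2 => nfValid tl2
    else nfValid tl

lemma nfValid_cons (t : String) (tl : List String) (h : t ≠ "--token-file") :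
    nfValid (t :: tl) = nfValid tl := by
  cases tl <;> simp [nfValid, h]

lemma nfValid_tf (v : String) (tl : List String) :
    nfValid ("--token-file" :: v :: tl) = nfValid tl := by
  simp [nfValid]

lemma nfValid_tf_nil : nfValid ["--token-file"] = false := by
  simp [nfValid]

lemma nfPre_json (tl : List String) : nfPre ("--json" :: tl) = "--json" :: nfPre tl := by
  cases tl <;> simp [nfPre]

lemma nfPre_tf (v : String) (tl : List String) :
    nfPre ("--token-file" :: v :: tl) = "--token-file" :: v :: nfPre tl := by
  simp [nfPre]

lemma nfPre_other (t : String) (tl : List String) (h1 : t ≠ "--json") (h2 : t ≠ "--token-file") :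
    nfPre (t :: tl) = nfPre tl := by
  cases tl <;> simp [nfPre, h1, h2]

lemma nfRest_json (tl : List String) : nfRest ("--json" :: tl) = nfRest tl := by
  cases tl <;> simp [nfRest]

lemma nfRest_tf (v : String) (tl : List String) :
    nfRest ("--token-file" :: v :: tl) = nfRest tl := by
  simp [nfRest]

lemma nfRest_other (t : String) (tl : List String) (h1 : t ≠ "--json") (h2 : t ≠ "--token-file") :
    nfRest (t :: tl) = t :: nfRest tl := by
  cases tl <;> simp [nfRest, h1, h2]

lemma getElemBang_append_len (kept : List String) (t : String) (tl : List String) :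
    (kept ++ t :: tl)[kept.length]! = t := by
  induction kept with
  | nil => simp
  | cons a k ih => simpa using ih

lemma drop_append_len (kept suffix : List String) (n : Nat) :
    (kept ++ suffix).drop (kept.length + n) = suffix.drop n := by
  induction kept with
  | nil => simp
  | cons a k ih => simpa [Nat.succ_add] using ih

lemma take_append_len (kept suffix : List String) :
    (kept ++ suffix).take kept.length = kept := by
  simp

-- characterisation of A's loop over the invariant remaining = kept ++ suffix, idx = kept.length
lemma nfLoopA_eq (n : Nat) :
    ∀ suffix : List String, suffix.length ≤ n →
    ∀ kept pre argv0 : List String,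
      nfLoopA argv0 (kept ++ suffix) pre kept.length =
        if nfValid suffix then pre ++ (nfPre suffix ++ (kept ++ nfRest suffix)) else argv0 := by
  induction n with
  | zero =>
    intro suffix hlen kept pre argv0
    have : suffix = [] := List.eq_nil_of_length_eq_zero (Nat.le_zero.mp hlen)
    subst this
    rw [nfLoopA]
    simp [nfValid, nfPre, nfRest]
  | succ m ih =>
    intro suffix hlen kept pre argv0
    match suffix with
    | [] =>
      rw [nfLoopA]
      simp [nfValid, nfPre, nfRest]
    | t :: tl =>
      rw [nfLoopA]
      have hidx : kept.length < (kept ++ t :: tl).length := by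
        simp
      rw [dif_pos hidx]
      simp only [getElemBang_append_len]
      by_cases hj : t = "--json"
      · subst hj
        rw [if_pos rfl]
        have hd : (kept ++ "--json" :: tl).drop (kept.length + 1) = tl := by
          simpa using drop_append_len kept ("--json" :: tl) 1
        rw [take_append_len, hd]
        have := ih tl (by simp at hlen; omega) kept (pre ++ ["--json"]) argv0
        rw [this]
        rw [nfValid_cons _ _ (by decide), nfPre_json, nfRest_json]
        split_ifs <;> simp
      · rw [if_neg hj]
        by_cases ht : t = "--token-file"
        · subst ht
          rw [if_pos rfl]
          match tl with
          | [] =>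
            have : (kept ++ ["--token-file"]).length ≤ kept.length + 1 := by simp
            rw [if_pos this]
            rw [nfValid_tf_nil]
            simp
          | v :: tl2 =>
            have hlen2 : ¬ (kept ++ "--token-file" :: v :: tl2).length ≤ kept.length + 1 := by
              simp [List.length_append]
            rw [if_neg hlen2]
            have hv : (kept ++ "--token-file" :: v :: tl2)[kept.length + 1]! = v := by
              have := getElemBang_append_len (kept ++ ["--token-file"]) v tl2
              simpa [List.append_assoc] using this
            have hd : (kept ++ "--token-file" :: v :: tl2).drop (kept.length + 2) = tl2 := by
              simpa using drop_append_len kept ("--token-file" :: v :: tl2) 2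
            rw [take_append_len, hd, hv]
            have := ih tl2 (by simp at hlen; omega) kept (pre ++ ["--token-file", v]) argv0
            rw [this]
            rw [nfValid_tf, nfPre_tf, nfRest_tf]
            split_ifs <;> simp
        · rw [if_neg ht]
          have hkt : kept.length + 1 = (kept ++ [t]).length := by simp
          have hre : kept ++ t :: tl = (kept ++ [t]) ++ tl := by simp
          rw [hkt, hre]
          have := ih tl (by simp at hlen; omega) (kept ++ [t]) pre argv0
          rw [this]
          rw [nfValid_cons _ _ ht, nfPre_other _ _ hj ht, nfRest_other _ _ hj ht]
          split_ifs <;> simp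

-- B's index-loop passes agree with the reference functions on the suffix from i
lemma nfValidB_eq (n : Nat) :
    ∀ (xs : List String) (i : Nat), xs.length - i ≤ n →
      nfValidB xs i = nfValid (xs.drop i) := by
  induction n with
  | zero =>
    intro xs i h
    rw [nfValidB]
    have : ¬ i < xs.length := by omega
    rw [dif_neg this]
    rw [List.drop_eq_nil_of_le (by omega)]
    rfl
  | succ m ih =>
    intro xs i h
    rw [nfValidB]
    by_cases hi : i < xs.length
    · rw [dif_pos hi]
      obtain ⟨t, tl, hdrop⟩ : ∃ t tl, xs.drop i = t :: tl :=
        List.exists_cons_of_ne_nil (by simp [List.drop_eq_nil_iff]; omega)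
      have hget : xs[i]! = t := by
        have h1 : xs = xs.take i ++ xs.drop i := (List.take_append_drop i xs).symm
        have h2 : (xs.take i).length = i := List.length_take_of_le (by omega)
        calc xs[i]! = (xs.take i ++ (t :: tl))[(xs.take i).length]! := by
              rw [← hdrop, ← h1, h2]
            _ = t := getElemBang_append_len _ _ _
      rw [hget, hdrop]
      by_cases ht : t = "--token-file"
      · rw [if_pos ht]
        have htl : tl = xs.drop (i + 1) := by
          have := congrArg (List.drop 1) hdrop
          simpa [List.drop_drop, Nat.add_comm] using this.symm
        by_cases hlen2 : xs.length ≤ i + 1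
        · rw [if_pos hlen2]
          have : tl = [] := by rw [htl]; exact List.drop_eq_nil_of_le (by omega)
          subst ht this
          rw [nfValid_tf_nil]
        · rw [if_neg hlen2]
          have htl2 : ∃ v tl2, tl = v :: tl2 := by
            apply List.exists_cons_of_ne_nil
            rw [htl]; simp [List.drop_eq_nil_iff]; omega
          obtain ⟨v, tl2, hv⟩ := htl2
          have hdd : xs.drop (i + 2) = tl2 := by
            have := congrArg (List.drop 2) hdrop
            simpa [List.drop_drop, hv, Nat.add_comm] using this
          rw [ih xs (i + 2) (by omega), hdd, hv]
          subst ht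
          rw [nfValid_tf]
      · rw [if_neg ht]
        have hdd : xs.drop (i + 1) = tl := by
          have := congrArg (List.drop 1) hdrop
          simpa [List.drop_drop, Nat.add_comm] using this
        rw [ih xs (i + 1) (by omega), hdd]
        rw [nfValid_cons _ _ ht]
    · rw [dif_neg hi]
      rw [List.drop_eq_nil_of_le (by omega)]
      rfl

lemma nfBuildB_eq (n : Nat) :
    ∀ (xs : List String) (i : Nat), xs.length - i ≤ n →
      nfValid (xs.drop i) = true →
      ∀ pre rest, nfBuildB xs i pre rest = (pre ++ nfPre (xs.drop i)) ++ (rest ++ nfRest (xs.drop i)) := by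
  induction n with
  | zero =>
    intro xs i h _ pre rest
    rw [nfBuildB]
    have hni : ¬ i < xs.length := by omega
    rw [dif_neg hni, List.drop_eq_nil_of_le (by omega)]
    simp [nfPre, nfRest]
  | succ m ih =>
    intro xs i h hval pre rest
    rw [nfBuildB]
    by_cases hi : i < xs.length
    · rw [dif_pos hi]
      obtain ⟨t, tl, hdrop⟩ : ∃ t tl, xs.drop i = t :: tl :=
        List.exists_cons_of_ne_nil (by simp [List.drop_eq_nil_iff]; omega)
      have hget : xs[i]! = t := by
        have h1 : xs = xs.take i ++ xs.drop i := (List.take_append_drop i xs).symm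
        have h2 : (xs.take i).length = i := List.length_take_of_le (by omega)
        calc xs[i]! = (xs.take i ++ (t :: tl))[(xs.take i).length]! := by
              rw [← hdrop, ← h1, h2]
            _ = t := getElemBang_append_len _ _ _
      have hd1 : xs.drop (i + 1) = tl := by
        have := congrArg (List.drop 1) hdrop
        simpa [List.drop_drop, Nat.add_comm] using this
      simp only [hget]
      by_cases hj : t = "--json"
      · rw [if_pos hj]
        rw [ih xs (i + 1) (by omega) (by
          rw [hd1]; rw [hdrop, hj, nfValid_cons _ _ (by decide)] at hval; exact hval) (pre ++ [t]) rest]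
        rw [hd1, hdrop, hj, nfPre_json, nfRest_json]
        simp
      · rw [if_neg hj]
        by_cases ht : t = "--token-file"
        · rw [if_pos ht]
          have hvne : tl ≠ [] := by
            intro hnil
            rw [hdrop, hnil] at hval
            simp [nfValid, ht] at hval
          obtain ⟨v, tl2, hv⟩ := List.exists_cons_of_ne_nil hvne
          have hgv : xs[i + 1]! = v := by
            have h1 : xs = xs.take (i+1) ++ xs.drop (i+1) := (List.take_append_drop (i+1) xs).symm
            have h2 : (xs.take (i+1)).length = i + 1 := List.length_take_of_le (by
              have : tl ≠ [] := hvne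
              have : xs.drop (i+1) ≠ [] := by rw [hd1]; exact hvne
              simp [List.drop_eq_nil_iff] at this; omega)
            calc xs[i + 1]! = (xs.take (i+1) ++ (v :: tl2))[(xs.take (i+1)).length]! := by
                  rw [← hv, ← hd1, ← h1, h2]
                _ = v := getElemBang_append_len _ _ _
          have hd2 : xs.drop (i + 2) = tl2 := by
            have := congrArg (List.drop 2) hdrop
            simpa [List.drop_drop, hv, Nat.add_comm] using this
          rw [hgv]
          rw [ih xs (i + 2) (by omega) (by
            rw [hd2]; rw [hdrop, hv, ht, nfValid_tf] at hval; exact hval) (pre ++ [t, v]) rest]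
          rw [hd2, hdrop, hv, ht, nfPre_tf, nfRest_tf]
          simp
        · rw [if_neg ht]
          rw [ih xs (i + 1) (by omega) (by
            rw [hd1]; rw [hdrop, nfValid_cons _ _ ht] at hval; exact hval) pre (rest ++ [t])]
          rw [hd1, hdrop, nfPre_other _ _ hj ht, nfRest_other _ _ hj ht]
          simp
    · rw [dif_neg hi, List.drop_eq_nil_of_le (by omega)]
      simp [nfPre, nfRest]

-- ===== VERDICT (by name: the statement is the Claim_ definition above) =====
theorem normalize_global_flags_spec : Claim_equal_normalize_global_flags := by
  intro argv _
  unfold Spec_normalize_global_flags normalize_global_flags normalize_global_flags_alt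
  match argv with
  | none => rfl
  | some xs =>
    simp only
    have hA := nfLoopA_eq xs.length xs le_rfl [] [] xs
    simp only [List.nil_append, List.length_nil] at hA
    rw [hA]
    rw [nfValidB_eq xs.length xs 0 (by omega)]
    simp only [List.drop_zero]
    by_cases hv : nfValid xs
    · rw [if_pos hv, if_pos hv]
      rw [nfBuildB_eq xs.length xs 0 (by omega) (by simpa using hv)]
      simp
    · rw [if_neg hv, if_neg hv]
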